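-- pv_equiv track=rewrite | github.com/rootanand/ArrayQuestions | Rotation/index_R_left.py | by_left
-- ===== SOURCE A (Python) =====
-- def by_left(Array,R,I):
--
--     Rotation=1
--
--     while not (Rotation>R):
--
--         X=Array.pop(0)
--         Array.append(X)
--         Rotation+=1
--
--     Value=-1
--
--     if (I<len(Array)):
--         Value=Array[I]
--     return Value
-- ===== SOURCE B (Python) =====
-- def by_left(Array, R, I):
--     # O(1): element at index I after R left-rotations is Array[(I + R) % n].
--     n = len(Array)
--     if I >= n:
--         return -1
--     return Array[(I + max(R, 0)) % n]
-- ===== Notes on version B (the rewrite author's own statement) =====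
-- stated objective: faster
-- what changed: B replaces A's loop of R pop(0)/append rotations followed by indexing with a direct O(1) index computation Array[(I + max(R,0)) % n] (and -1 when I >= n), so no rotation is performed at all.
import Mathlib
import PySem

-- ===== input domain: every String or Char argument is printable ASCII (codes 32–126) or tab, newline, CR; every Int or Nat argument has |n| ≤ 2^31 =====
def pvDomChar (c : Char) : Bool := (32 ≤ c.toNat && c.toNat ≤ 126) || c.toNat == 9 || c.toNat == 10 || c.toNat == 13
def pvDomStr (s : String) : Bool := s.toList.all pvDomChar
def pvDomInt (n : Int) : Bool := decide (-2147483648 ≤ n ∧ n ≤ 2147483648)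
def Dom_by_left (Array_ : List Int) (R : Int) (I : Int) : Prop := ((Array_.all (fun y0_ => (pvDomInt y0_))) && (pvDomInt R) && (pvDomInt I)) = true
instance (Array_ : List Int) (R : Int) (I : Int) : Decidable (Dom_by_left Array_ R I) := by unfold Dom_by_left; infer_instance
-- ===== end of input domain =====

-- B replaces A's R pop/append rotations with the O(1) index formula (I + max(R,0)) % n;
-- equivalence is about the RETURN value only (Python A rotates the caller's list in place, B does not mutate it).

-- ===== PORT A =====
-- the while loop: pop(0) + append, R times (none = IndexError from pop on an empty list)
def by_left_loop (arr : List Int) (rotation : Int) (R : Int) : Option (List Int) :=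
  if rotation > R then some arr
  else
    match PySem.List.pop? arr 0 with
    | none => none
    | some (x, rest) => by_left_loop (rest ++ [x]) (rotation + 1) R
termination_by (R + 1 - rotation).toNat
decreasing_by omega

def by_left (Array_ : List Int) (R : Int) (I : Int) : Int :=
  match by_left_loop Array_ 1 R with
  | none => 0   -- unreachable under Pre_ (Python raises IndexError here)
  | some arr =>
    let value : Int := -1
    if I < (arr.length : Int) then (PySem.List.pyGet? arr I).getD value else value

-- ===== PORT B =====
def by_left_alt (Array_ : List Int) (R : Int) (I : Int) : Int :=
  let n : Int := Array_.length
  if I ≥ n then -1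
  else (PySem.List.pyGet? Array_ (PySem.Int.mod (I + max R 0) n)).getD 0

-- ===== PRECONDITION & SPEC =====
-- Pre_ excludes exactly the inputs where Python A raises IndexError: popping from an
-- empty list (Array empty with R ≥ 1) and a too-negative index I < -len(Array).
def Pre_by_left (Array_ : List Int) (R : Int) (I : Int) : Prop :=
  (Array_ ≠ [] ∨ R ≤ 0) ∧ -(Array_.length : Int) ≤ I
instance (Array_ : List Int) (R : Int) (I : Int) : Decidable (Pre_by_left Array_ R I) := by
  unfold Pre_by_left; infer_instance

def pvWitness_by_left : List Int × Int × Int := ([3, 1, 4, 1, 5], 2, 1)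

def Spec_by_left (Array_ : List Int) (R : Int) (I : Int) (out : Int) : Prop := out = by_left_alt Array_ R I
instance (Array_ : List Int) (R : Int) (I : Int) (out : Int) : Decidable (Spec_by_left Array_ R I out) := by unfold Spec_by_left; infer_instance

-- ===== CLAIM (what is proved, stated in full; the proofs are below) =====
def Claim_equal_by_left : Prop := ∀ (Array_ : List Int) (R : Int) (I : Int), Dom_by_left Array_ R I → Pre_by_left Array_ R I → Spec_by_left Array_ R I (by_left Array_ R I)


-- ===== LEMMAS AND PROOFS =====

-- A's loop performs exactly (R + 1 - rotation).toNat left rotations.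
theorem by_left_loop_eq (k : Nat) : ∀ (arr : List Int) (rotation R : Int),
    arr ≠ [] → (R + 1 - rotation).toNat = k →
    by_left_loop arr rotation R = some (arr.rotate k) := by
  induction k with
  | zero =>
    intro arr rotation R _ hk
    rw [by_left_loop]
    have : rotation > R := by omega
    simp [this]
  | succ k ih =>
    intro arr rotation R hne hk
    rw [by_left_loop]
    have hle : ¬ rotation > R := by omega
    obtain ⟨x, rest, rfl⟩ := List.exists_cons_of_ne_nil hne
    simp only [hle, if_false, PySem.List.pop?_zero_cons]
    rw [ih (rest ++ [x]) (rotation + 1) R (by simp) (by omega)]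
    rw [List.rotate_cons_succ]

theorem by_left_loop_empty (R : Int) (h : R ≤ 0) : by_left_loop [] 1 R = some [] := by
  rw [by_left_loop]; simp; omega

theorem by_left_spec : Claim_equal_by_left := by
  intro Array_ R I _ hpre
  obtain ⟨h1, h2⟩ := hpre
  unfold Spec_by_left by_left by_left_alt
  have hrot : by_left_loop Array_ 1 R = some (Array_.rotate R.toNat) := by
    rcases eq_or_ne Array_ [] with rfl | hne
    · have hR : R ≤ 0 := by tauto
      have : R.toNat = 0 := by omega
      rw [this, List.rotate_zero]
      exact by_left_loop_empty R hR
    · exact by_left_loop_eq R.toNat Array_ 1 R hne (by omega)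
  rw [hrot]
  dsimp only
  simp only [List.length_rotate]
  by_cases hI : I < (Array_.length : Int)
  · rw [if_pos hI, if_neg (by omega)]
    have hnpos : 0 < Array_.length := by omega
    -- normalized nonnegative index j with (j : Int) ≡ I mod length
    obtain ⟨j, hj, hjI⟩ : ∃ j : Nat, j < Array_.length ∧
        ((j : Int) = I ∨ (j : Int) = I + Array_.length) := by
      rcases le_or_gt 0 I with h0 | h0
      · exact ⟨I.toNat, by omega, Or.inl (by omega)⟩
      · exact ⟨(I + Array_.length).toNat, by omega, Or.inr (by omega)⟩
    have hj' : j < (Array_.rotate R.toNat).length := by simpa using hj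
    have hm : (j + R.toNat) % Array_.length < Array_.length := Nat.mod_lt _ hnpos
    have hA : PySem.List.pyGet? (Array_.rotate R.toNat) I
        = some (Array_[(j + R.toNat) % Array_.length]'hm) := by
      rcases hjI with hji | hji
      · rw [← hji, PySem.List.pyGet?_natCast, List.getElem?_eq_getElem hj',
          List.getElem_rotate]
      · have hIneg : I = -(((-I).toNat : Nat) : Int) := by omega
        rw [hIneg, PySem.List.pyGet?_neg_natCast _ _ (by omega) (by simp; omega)]
        have hjj : (Array_.rotate R.toNat).length - (-I).toNat = j := by simp; omega
        rw [hjj, List.getElem?_eq_getElem hj', List.getElem_rotate]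
    have hB : PySem.Int.mod (I + max R 0) (Array_.length : Int)
        = (((j + R.toNat) % Array_.length : Nat) : Int) := by
      have hmax : max R 0 = ((R.toNat : Nat) : Int) := by omega
      rw [PySem.Int.mod_eq_emod_of_pos (by exact_mod_cast hnpos), hmax]
      rcases hjI with hji | hji
      · have h' : I + (R.toNat : Int) = ((j + R.toNat : Nat) : Int) := by push_cast; omega
        rw [h', Int.natCast_mod]
      · have h' : I + (R.toNat : Int) = ((j + R.toNat : Nat) : Int) - (Array_.length : Int) := by
          push_cast; omega
        rw [h', Int.sub_emod_right, Int.natCast_mod]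
    rw [hA, hB, PySem.List.pyGet?_natCast, List.getElem?_eq_getElem hm]
    rfl
  · rw [if_neg hI, if_pos (by omega)]
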